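-- pv_equiv track=rewrite | github.com/GC549739653/comp | sudokufinl.py | _get_freq_digits
-- ===== SOURCE A (Python) =====
-- def _get_freq_digits(data):
--     dic = {}
--     for i in range(1, 10): dic[i] = data.count(i)
--     freq_l = []
--     times = list(dic.values())
--     times.sort()
--     for i in times:  # find the most freqent digit
--         for j in range(1, 10):
--             if i == dic[j] and j not in freq_l:
--                 freq_l.append(j)
--     freq_l.reverse()
--     return freq_l
-- ===== SOURCE B (Python) =====
-- def _get_freq_digits(data):
--     # digits are < 10, so the key 10*count + digit orders by (count, digit);
--     # reverse=True gives frequency descending, ties broken by larger digit first.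
--     return sorted(range(1, 10), key=lambda d: 10 * data.count(d) + d, reverse=True)
-- ===== Notes on version B (the rewrite author's own statement) =====
-- stated objective: simpler
-- what changed: A sorts the nine count values and reconstructs the digit order with a nested 9x9 membership-checked scan plus a final reverse; B is a one-line reverse keyed sort of the digits 1-9 (key 10*count+digit encodes frequency-then-digit order, both descending).
import Mathlib
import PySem

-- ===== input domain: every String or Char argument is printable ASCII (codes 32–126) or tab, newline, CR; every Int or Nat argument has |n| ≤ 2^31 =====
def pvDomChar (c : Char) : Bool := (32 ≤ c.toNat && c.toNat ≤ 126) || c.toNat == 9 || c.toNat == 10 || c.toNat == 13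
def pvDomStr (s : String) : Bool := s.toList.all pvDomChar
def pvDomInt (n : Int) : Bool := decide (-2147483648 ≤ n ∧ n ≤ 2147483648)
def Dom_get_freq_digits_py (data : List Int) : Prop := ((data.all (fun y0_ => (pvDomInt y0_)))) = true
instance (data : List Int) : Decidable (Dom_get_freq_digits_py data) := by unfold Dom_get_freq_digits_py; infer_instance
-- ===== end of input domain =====

-- B replaces A's sort-the-counts-then-nested-reconstruct-then-reverse with one keyed
-- reverse sort of the digits 1..9 (objective: simpler).

-- ===== PORT A =====
def get_freq_digits_py (data : List Int) : List Int :=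
  -- dic = {}; for i in range(1, 10): dic[i] = data.count(i)
  let dic : PySem.Dict Int Int :=
    (PySem.List.pyRange 1 10 1).foldl
      (fun d i => PySem.Dict.insert d i (PySem.List.count data i : Int)) PySem.Dict.empty
  -- times = list(dic.values()); times.sort()
  let times : List Int := PySem.List.sorted (PySem.Dict.values dic) (fun x => x) false
  -- for i in times: for j in range(1, 10): if i == dic[j] and j not in freq_l: freq_l.append(j)
  -- (dic[j]: every j in range(1,10) is a key of dic, so the KeyError branch is unreachable
  --  and getD with any default is exact)
  let freq_l : List Int :=
    times.foldl (fun acc i =>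
      (PySem.List.pyRange 1 10 1).foldl
        (fun acc j => if i = PySem.Dict.getD dic j 0 ∧ j ∉ acc then acc ++ [j] else acc)
        acc) []
  -- freq_l.reverse(); return freq_l
  freq_l.reverse

-- ===== PORT B =====
def get_freq_digits_py_alt (data : List Int) : List Int :=
  -- return sorted(range(1, 10), key=lambda d: 10 * data.count(d) + d, reverse=True)
  PySem.List.sorted (PySem.List.pyRange 1 10 1)
    (fun d => 10 * (PySem.List.count data d : Int) + d) true

-- ===== PRECONDITION & SPEC =====
def Spec_get_freq_digits_py (data : List Int) (out : List Int) : Prop := out = get_freq_digits_py_alt data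
instance (data : List Int) (out : List Int) : Decidable (Spec_get_freq_digits_py data out) := by unfold Spec_get_freq_digits_py; infer_instance

-- ===== CLAIM (what is proved, stated in full; the proofs are below) =====
def Claim_equal_get_freq_digits_py : Prop := ∀ (data : List Int), Dom_get_freq_digits_py data → Spec_get_freq_digits_py data (get_freq_digits_py data)

-- ===== LEMMAS AND PROOFS =====

-- A's inner loop over E appends (in order) exactly the j ∈ E with count i that are not
-- already in acc; valid because E has no duplicates.
theorem pv_inner_fold (c : Int → Int) (i : Int) :
    ∀ (E acc : List Int), E.Nodup →
      E.foldl (fun acc j => if i = c j ∧ j ∉ acc then acc ++ [j] else acc) acc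
        = acc ++ E.filter (fun j => decide (i = c j ∧ j ∉ acc)) := by
  intro E
  induction E with
  | nil => simp
  | cons x E ih =>
    intro acc hnd
    have hx : x ∉ E := (List.nodup_cons.mp hnd).1
    have hE : E.Nodup := (List.nodup_cons.mp hnd).2
    simp only [List.foldl_cons, List.filter_cons]
    by_cases hc : i = c x ∧ x ∉ acc
    · rw [if_pos hc, ih _ hE]
      have hfc : E.filter (fun j => decide (i = c j ∧ j ∉ acc ++ [x]))
          = E.filter (fun j => decide (i = c j ∧ j ∉ acc)) := by
        apply List.filter_congr
        intro j hj
        have hjx : j ≠ x := fun h => hx (h ▸ hj)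
        simp [List.mem_append, hjx]
      rw [hfc]
      simp [hc]
    · rw [if_neg hc, ih _ hE]
      simp [hc]

-- Invariant of A's outer loop over the ascending count values.
theorem pv_outer_fold (c : Int → Int) (E : List Int) (hEnd : E.Nodup)
    (hElt : E.Pairwise (· < ·)) (hEb : ∀ x ∈ E, 1 ≤ x ∧ x < 10) :
    ∀ (ts acc : List Int),
      ts.Pairwise (· ≤ ·) →
      (∀ a ∈ acc, a ∈ E) →
      acc.Pairwise (fun a b => 10 * c a + a < 10 * c b + b) →
      (∀ a ∈ acc, ∀ i ∈ ts, c a ≤ i) →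
      (∀ a ∈ acc, ∀ j ∈ E, c j = c a → j ∈ acc) →
      (∀ a ∈ acc, a ∈ ts.foldl (fun acc i => E.foldl
          (fun acc j => if i = c j ∧ j ∉ acc then acc ++ [j] else acc) acc) acc) ∧
      (∀ a ∈ ts.foldl (fun acc i => E.foldl
          (fun acc j => if i = c j ∧ j ∉ acc then acc ++ [j] else acc) acc) acc, a ∈ E) ∧
      (ts.foldl (fun acc i => E.foldl
          (fun acc j => if i = c j ∧ j ∉ acc then acc ++ [j] else acc) acc) acc).Pairwise
        (fun a b => 10 * c a + a < 10 * c b + b) ∧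
      (∀ j ∈ E, c j ∈ ts → j ∈ ts.foldl (fun acc i => E.foldl
          (fun acc j => if i = c j ∧ j ∉ acc then acc ++ [j] else acc) acc) acc) := by
  intro ts
  induction ts with
  | nil =>
    intro acc _ hmem hpair _ _
    exact ⟨fun a ha => ha, hmem, hpair, by simp⟩
  | cons i rest ih =>
    intro acc hts hmem hpair hle hsat
    have hi_le : ∀ x ∈ rest, i ≤ x := (List.pairwise_cons.mp hts).1
    have hrest : rest.Pairwise (· ≤ ·) := (List.pairwise_cons.mp hts).2
    simp only [List.foldl_cons]
    rw [pv_inner_fold c i E acc hEnd]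
    set fp := E.filter (fun j => decide (i = c j ∧ j ∉ acc)) with hfp
    have hfp_mem : ∀ b ∈ fp, b ∈ E ∧ c b = i ∧ b ∉ acc := by
      intro b hb
      rw [hfp, List.mem_filter] at hb
      have := of_decide_eq_true hb.2
      exact ⟨hb.1, this.1.symm, this.2⟩
    have hmem' : ∀ a ∈ acc ++ fp, a ∈ E := by
      intro a ha
      rcases List.mem_append.mp ha with h | h
      · exact hmem a h
      · exact (hfp_mem a h).1
    have hcross : ∀ a ∈ acc, ∀ b ∈ fp, 10 * c a + a < 10 * c b + b := by
      intro a ha b hb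
      obtain ⟨hbE, hbc, hbna⟩ := hfp_mem b hb
      have hca_le : c a ≤ i := hle a ha i (List.mem_cons_self ..)
      have hca_ne : c a ≠ i := by
        intro h
        exact hbna (hsat a ha b hbE (by omega))
      have ha9 := hEb a (hmem a ha)
      have hb9 := hEb b hbE
      omega
    have hpair' : (acc ++ fp).Pairwise (fun a b => 10 * c a + a < 10 * c b + b) := by
      refine List.pairwise_append.mpr ⟨hpair, ?_, hcross⟩
      have : fp.Pairwise (· < ·) := hElt.filter _
      refine this.imp_of_mem ?_
      intro a b ha hb hab
      have hca := (hfp_mem a ha).2.1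
      have hcb := (hfp_mem b hb).2.1
      omega
    have hle' : ∀ a ∈ acc ++ fp, ∀ x ∈ rest, c a ≤ x := by
      intro a ha x hx
      rcases List.mem_append.mp ha with h | h
      · exact hle a h x (List.mem_cons_of_mem _ hx)
      · have h1 := (hfp_mem a h).2.1
        have h2 := hi_le x hx
        omega
    have hsat' : ∀ a ∈ acc ++ fp, ∀ j ∈ E, c j = c a → j ∈ acc ++ fp := by
      intro a ha j hjE hcj
      rcases List.mem_append.mp ha with h | h
      · exact List.mem_append.mpr (Or.inl (hsat a h j hjE hcj))
      · have hca := (hfp_mem a h).2.1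
        by_cases hj : j ∈ acc
        · exact List.mem_append.mpr (Or.inl hj)
        · refine List.mem_append.mpr (Or.inr ?_)
          rw [hfp, List.mem_filter]
          exact ⟨hjE, decide_eq_true (by exact ⟨by omega, hj⟩)⟩
    obtain ⟨g1, g2, g3, g4⟩ := ih (acc ++ fp) hrest hmem' hpair' hle' hsat'
    refine ⟨?_, g2, g3, ?_⟩
    · intro a ha
      exact g1 a (List.mem_append.mpr (Or.inl ha))
    · intro j hjE hcj
      rcases List.mem_cons.mp hcj with h | h
      · have hj' : j ∈ acc ++ fp := by
          by_cases hj : j ∈ acc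
          · exact List.mem_append.mpr (Or.inl hj)
          · refine List.mem_append.mpr (Or.inr ?_)
            rw [hfp, List.mem_filter]
            exact ⟨hjE, decide_eq_true ⟨h.symm, hj⟩⟩
        exact g1 j hj'
      · exact g4 j hjE h

-- ===== VERDICT (by name: the statement is the Claim_ definition above) =====
theorem get_freq_digits_py_spec : Claim_equal_get_freq_digits_py := by
  intro data _
  unfold Spec_get_freq_digits_py
  simp only [get_freq_digits_py, get_freq_digits_py_alt]
  set D := PySem.List.pyRange 1 10 1 with hD
  set c : Int → Int := fun d => (PySem.List.count data d : Int) with hc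
  set dic := D.foldl
    (fun d i => PySem.Dict.insert d i (PySem.List.count data i : Int)) PySem.Dict.empty with hdic
  have hDnd : D.Nodup := PySem.List.nodup_pyRange_one 1 10
  have hitems : dic.items = D.map (fun i => (i, c i)) := by
    rw [hdic]
    have h := PySem.Dict.items_foldl_insert_fresh D (fun a => a) (fun a => c a) PySem.Dict.empty
      (fun a _ => PySem.Dict.contains_empty a) (by simpa using hDnd)
    simpa using h
  have hkeys : dic.keys = D := by
    rw [PySem.Dict.keys.eq_1, hitems, List.map_map]
    have hcomp : ((fun x : Int × Int => x.1) ∘ fun i => (i, c i)) = fun i => i := rfl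
    rw [hcomp]
    simp
  have hknd : dic.keys.Nodup := hkeys ▸ hDnd
  have hvals : PySem.Dict.values dic = D.map c := by
    rw [PySem.Dict.values.eq_1, hitems, List.map_map]
    rfl
  have hget : ∀ j ∈ D, PySem.Dict.getD dic j 0 = c j := by
    intro j hj
    apply PySem.Dict.getD_of_mem_items dic ?_ hknd 0
    rw [hitems]
    exact List.mem_map.mpr ⟨j, hj, rfl⟩
  rw [hvals]
  set times := PySem.List.sorted (D.map c) (fun x => x) false with htimes
  have hts_pair : times.Pairwise (· ≤ ·) := PySem.List.sorted_pairwise (D.map c) (fun x => x)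
  have hts_mem : ∀ j ∈ D, c j ∈ times := by
    intro j hj
    rw [htimes, PySem.List.mem_sorted]
    exact List.mem_map_of_mem hj
  have hstep : times.foldl (fun acc i => D.foldl
        (fun acc j => if i = PySem.Dict.getD dic j 0 ∧ j ∉ acc then acc ++ [j] else acc) acc) []
      = times.foldl (fun acc i => D.foldl
        (fun acc j => if i = c j ∧ j ∉ acc then acc ++ [j] else acc) acc) [] := by
    apply PySem.List.foldl_congr_mem
    intro acc i _
    apply PySem.List.foldl_congr_mem
    intro acc2 j hj
    rw [hget j hj]
  rw [hstep]
  obtain ⟨-, gE, gpair, gmem⟩ := pv_outer_fold c D hDnd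
    (PySem.List.pairwise_lt_pyRange_one 1 10)
    (fun x hx => PySem.List.mem_pyRange_one.mp hx)
    times [] hts_pair (by simp) (by simp) (by simp) (by simp)
  set fl := times.foldl (fun acc i => D.foldl
    (fun acc j => if i = c j ∧ j ∉ acc then acc ++ [j] else acc) acc) [] with hfl
  have hnd : fl.Nodup :=
    gpair.imp_of_mem (fun _ _ h heq => by subst heq; omega)
  have hperm : fl.Perm D := by
    rw [List.perm_ext_iff_of_nodup hnd hDnd]
    intro a
    exact ⟨fun h => gE a h, fun h => gmem a h (hts_mem a h)⟩
  symm
  apply PySem.List.sorted_rev_eq_of_perm_of_pairwise_gt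
  · exact (List.reverse_perm fl).trans hperm
  · rw [List.pairwise_reverse]
    exact gpair
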